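-- pv_equiv track=rewrite | github.com/marindeaudouce/advent_of_code_2024 | day09/disk.py | part1
-- ===== SOURCE A (Python) =====
-- def part1(map: dict, empty_pos: list):
--     """ Part 1 """
--     new_map = dict()
--     new_empty = empty_pos
--     for id in reversed(map.keys()):
--         positions = map.get(id)
--         pos_nbr = len(positions)
--
--         all_positions = positions + new_empty
--         all_positions.sort()
--         positions = all_positions[:pos_nbr]
--         new_empty = all_positions[pos_nbr:]
--
--         new_map[id] = positions
--     return new_map
-- ===== SOURCE B (Python) =====
-- def part1(map: dict, empty_pos: list):
--     new_map = {}
--     pool = sorted(empty_pos, reverse=True)  # descending: smallest block at the end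
--     for id in reversed(map.keys()):
--         ps = sorted(map[id], reverse=True)
--         k = len(ps)
--         assigned = []
--         for _ in range(k):
--             if ps and (not pool or ps[-1] <= pool[-1]):
--                 assigned.append(ps.pop())
--             else:
--                 assigned.append(pool.pop())
--         for x in ps:
--             lo, hi = 0, len(pool)
--             while lo < hi:
--                 mid = (lo + hi) // 2
--                 if pool[mid] > x:
--                     lo = mid + 1
--                 else:
--                     hi = mid
--             pool.insert(lo, x)
--         new_map[id] = assigned
--     return new_map
-- ===== Notes on version B (the rewrite author's own statement) =====
-- stated objective: faster
-- what changed: Instead of concatenating and fully re-sorting positions + free pool for every file id, B keeps the free pool as one descending sorted list and, per id, pops the k smallest blocks off the list ends and re-inserts leftover positions via hand-written binary search.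
import Mathlib
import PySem

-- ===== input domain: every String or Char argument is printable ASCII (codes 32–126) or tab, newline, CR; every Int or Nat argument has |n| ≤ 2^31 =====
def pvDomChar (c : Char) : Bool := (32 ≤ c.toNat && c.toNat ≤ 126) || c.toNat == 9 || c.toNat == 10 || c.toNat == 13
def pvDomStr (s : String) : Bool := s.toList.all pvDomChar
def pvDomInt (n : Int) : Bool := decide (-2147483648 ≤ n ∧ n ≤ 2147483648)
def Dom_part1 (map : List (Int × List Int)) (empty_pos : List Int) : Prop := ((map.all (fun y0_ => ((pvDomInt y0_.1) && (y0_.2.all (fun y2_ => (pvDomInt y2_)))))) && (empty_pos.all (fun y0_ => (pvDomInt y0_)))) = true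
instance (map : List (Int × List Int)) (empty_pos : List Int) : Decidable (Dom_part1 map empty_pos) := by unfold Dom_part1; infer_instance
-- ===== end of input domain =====

-- B keeps the free pool as one descending sorted list (pops smallest from the end, binary-search
-- re-insert of leftovers) instead of re-sorting positions + pool for every file id (objective: faster).


-- ===== PORT A =====
-- loop body of A: all = sorted(positions + new_empty); keep the first len(positions), rest become new_empty
def pvStepA (st : List (Int × List Int) × List Int) (idp : Int × List Int) :
    List (Int × List Int) × List Int :=
  let positions := idp.2
  let pos_nbr := positions.length
  let all_positions := PySem.List.sorted (positions ++ st.2) (fun x => x) false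
  (st.1 ++ [(idp.1, all_positions.take pos_nbr)], all_positions.drop pos_nbr)

def part1 (map : List (Int × List Int)) (empty_pos : List Int) : List (Int × List Int) :=
  (map.reverse.foldl pvStepA ([], empty_pos)).1

-- ===== PORT B =====
-- Source B's hand-written binary search (while lo < hi); lo and hi are Python ints that stay ≥ 0 and
-- ≤ len(pool) on every reachable state, so they are ported as Nat and pool[mid] as getD (exact there)
def pvBisect (pool : List Int) (x : Int) (lo hi : Nat) : Nat :=
  if _h : lo < hi then
    let mid := (lo + hi) / 2
    if pool.getD mid 0 > x then pvBisect pool x (mid + 1) hi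
    else pvBisect pool x lo mid
  else lo
termination_by hi - lo
decreasing_by
  all_goals
    have hle : lo ≤ (lo + hi) / 2 := (Nat.le_div_iff_mul_le (by omega)).mpr (by omega)
    have hlt : (lo + hi) / 2 < hi := (Nat.div_lt_iff_lt_mul (by omega)).mpr (by omega)
    omega

-- Source B's selection loop: k times pop the smaller of ps[-1], pool[-1] (pops are from the list ends);
-- pool.pop() on an empty pool would raise in Python but is unreachable (the loop runs len(ps) times),
-- so ps[-1] / pool[-1] / pop() are ported as getLastD 0 / dropLast (exact on every reachable state)
def pvSelect : Nat → List Int → List Int → List Int → List Int × List Int × List Int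
  | 0, ps, pool, assigned => (ps, pool, assigned)
  | Nat.succ n, ps, pool, assigned =>
    if !ps.isEmpty && (pool.isEmpty || decide (ps.getLastD 0 ≤ pool.getLastD 0)) then
      pvSelect n ps.dropLast pool (assigned ++ [ps.getLastD 0])
    else
      pvSelect n ps pool.dropLast (assigned ++ [pool.getLastD 0])

-- pool.insert(lo, x) with lo from the binary search
def pvInsert (pool : List Int) (x : Int) : List Int :=
  pool.insertIdx (pvBisect pool x 0 pool.length) x

-- loop body of B: pop the k smallest of ps ∪ pool, then re-insert the leftover positions
def pvStepB (st : List (Int × List Int) × List Int) (idp : Int × List Int) :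
    List (Int × List Int) × List Int :=
  let ps := PySem.List.sorted idp.2 (fun x => x) true
  let res := pvSelect ps.length ps st.2 []
  (st.1 ++ [(idp.1, res.2.2)], res.1.foldl pvInsert res.2.1)

def part1_alt (map : List (Int × List Int)) (empty_pos : List Int) : List (Int × List Int) :=
  (map.reverse.foldl pvStepB ([], PySem.List.sorted empty_pos (fun x => x) true)).1

-- ===== PRECONDITION & SPEC =====
-- (A is total: no Pre_)

def Spec_part1 (map : List (Int × List Int)) (empty_pos : List Int) (out : List (Int × List Int)) : Prop := out = part1_alt map empty_pos
instance (map : List (Int × List Int)) (empty_pos : List Int) (out : List (Int × List Int)) : Decidable (Spec_part1 map empty_pos out) := by unfold Spec_part1; infer_instance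

-- ===== CLAIM (what is proved, stated in full; the proofs are below) =====
def Claim_equal_part1 : Prop := ∀ (map : List (Int × List Int)) (empty_pos : List Int), Dom_part1 map empty_pos → Spec_part1 map empty_pos (part1 map empty_pos)

-- ===== LEMMAS AND PROOFS =====

-- proof-side ascending merge used to characterise what the selection loop extracts
def pvM : List Int → List Int → List Int
  | [], ys => ys
  | x :: xs, [] => x :: xs
  | x :: xs, y :: ys => if x ≤ y then x :: pvM xs (y :: ys) else y :: pvM (x :: xs) ys

theorem pvM_nil_right (xs : List Int) : pvM xs [] = xs := by cases xs <;> simp [pvM]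

theorem pvM_perm (xs ys : List Int) : (pvM xs ys).Perm (xs ++ ys) := by
  fun_induction pvM xs ys with
  | case1 ys => simp
  | case2 x xs => simp
  | case3 x xs y ys h ih => simpa using ih.cons x
  | case4 x xs y ys h ih => exact (ih.cons y).trans List.perm_middle.symm

theorem pvM_pairwise (xs ys : List Int) (hxs : xs.Pairwise (· ≤ ·))
    (hys : ys.Pairwise (· ≤ ·)) : (pvM xs ys).Pairwise (· ≤ ·) := by
  fun_induction pvM xs ys with
  | case1 ys => simpa using hys
  | case2 x xs => simpa using hxs
  | case3 x xs y ys h ih =>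
      rw [List.pairwise_cons] at hxs ⊢
      refine ⟨fun b hb => ?_, ih hxs.2 hys⟩
      rcases List.mem_append.mp ((pvM_perm xs (y :: ys)).mem_iff.mp hb) with hb | hb
      · exact hxs.1 b hb
      · rw [List.pairwise_cons] at hys
        rcases List.mem_cons.mp hb with rfl | hb
        · exact h
        · exact le_trans h (hys.1 b hb)
  | case4 x xs y ys h ih =>
      rw [List.pairwise_cons] at hys ⊢
      refine ⟨fun b hb => ?_, ih hxs hys.2⟩
      have hyx : y ≤ x := le_of_not_ge (fun hc => h hc)
      rcases List.mem_append.mp ((pvM_perm (x :: xs) ys).mem_iff.mp hb) with hb | hb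
      · rw [List.pairwise_cons] at hxs
        rcases List.mem_cons.mp hb with rfl | hb
        · exact hyx
        · exact le_trans hyx (hxs.1 b hb)
      · exact hys.1 b hb

-- the binary search returns a split point of a descending pool: everything before it is > x,
-- everything from it on is ≤ x
theorem pvBisect_spec (pool : List Int) (x : Int) :
    ∀ (fuel lo hi : Nat), hi - lo ≤ fuel →
    pool.Pairwise (· ≥ ·) → hi ≤ pool.length → lo ≤ hi →
    (∀ i (h : i < pool.length), i < lo → x < pool[i]) →
    (∀ i (h : i < pool.length), hi ≤ i → pool[i] ≤ x) →
    pvBisect pool x lo hi ≤ pool.length ∧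
    (∀ i (h : i < pool.length), i < pvBisect pool x lo hi → x < pool[i]) ∧
    (∀ i (h : i < pool.length), pvBisect pool x lo hi ≤ i → pool[i] ≤ x) := by
  intro fuel
  induction fuel with
  | zero =>
      intro lo hi hfuel hp hhi hlo hb ha
      have : ¬ lo < hi := by omega
      rw [pvBisect, dif_neg this]
      exact ⟨le_trans hlo hhi, fun i h hi' => hb i h hi',
        fun i h hi' => ha i h (by omega)⟩
  | succ fuel ih =>
      intro lo hi hfuel hp hhi hlo hb ha
      by_cases hlt : lo < hi
      · have hmono : ∀ (i j : Nat) (hj : j < pool.length) (hij : i ≤ j),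
            pool[j]'hj ≤ pool[i]'(Nat.lt_of_le_of_lt hij hj) := by
          intro i j hj hij
          rcases Nat.lt_or_eq_of_le hij with h | h
          · exact (List.pairwise_iff_getElem.mp hp) i j (Nat.lt_of_lt_of_le h (le_of_lt hj)) hj h
          · subst h; exact le_refl _
        rw [pvBisect, dif_pos hlt]
        simp only []
        set mid := (lo + hi) / 2 with hmid
        have hmlo : lo ≤ mid := (Nat.le_div_iff_mul_le (by omega)).mpr (by omega)
        have hmhi : mid < hi := (Nat.div_lt_iff_lt_mul (by omega)).mpr (by omega)
        have hmlen : mid < pool.length := lt_of_lt_of_le hmhi hhi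
        rw [List.getD_eq_getElem pool 0 hmlen]
        by_cases hx : pool[mid] > x
        · rw [if_pos hx]
          refine ih (mid + 1) hi (by omega) hp hhi (by omega) ?_ ha
          intro i h hi'
          rcases Nat.lt_or_ge i lo with hil | hil
          · exact hb i h hil
          · exact lt_of_lt_of_le hx (hmono i mid hmlen (by omega))
        · rw [if_neg hx]
          refine ih lo mid (by omega) hp (le_of_lt hmlen) hmlo hb ?_
          intro i h hi'
          exact le_trans (hmono mid i h hi') (le_of_not_gt hx)
      · rw [pvBisect, dif_neg hlt]
        exact ⟨le_trans hlo hhi, fun i h hi' => hb i h hi',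
          fun i h hi' => ha i h (by omega)⟩

theorem insertIdx_eq_take_cons_drop (l : List Int) (n : Nat) (a : Int) (h : n ≤ l.length) :
    l.insertIdx n a = l.take n ++ a :: l.drop n := by
  induction l generalizing n with
  | nil => simp at h; subst h; rfl
  | cons y ys ih =>
      cases n with
      | zero => rfl
      | succ n =>
          simp only [List.insertIdx_succ_cons, List.take_succ_cons, List.drop_succ_cons,
            List.cons_append, List.cons.injEq, true_and]
          exact ih n (by simpa using h)

-- one binary-search insert keeps the pool descending and adds x to its contents
theorem pvInsert_facts (pool : List Int) (x : Int) (hp : pool.Pairwise (· ≥ ·)) :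
    (pvInsert pool x).Pairwise (· ≥ ·) ∧ (pvInsert pool x).Perm (x :: pool) := by
  obtain ⟨hle, hbefore, hafter⟩ :=
    pvBisect_spec pool x pool.length 0 pool.length (by omega) hp (le_refl _) (by omega)
      (by intro i h hi'; omega) (by intro i h hi'; omega)
  set r := pvBisect pool x 0 pool.length with hr
  rw [pvInsert, ← hr, insertIdx_eq_take_cons_drop pool r x hle]
  constructor
  · rw [List.pairwise_append]
    refine ⟨hp.sublist (List.take_sublist _ _), ?_, ?_⟩
    · rw [List.pairwise_cons]
      refine ⟨?_, hp.sublist (List.drop_sublist _ _)⟩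
      intro b hb
      obtain ⟨i, hi, rfl⟩ := List.mem_iff_getElem.mp hb
      have hlen : r + i < pool.length := by
        rw [List.length_drop] at hi; omega
      rw [List.getElem_drop]
      exact hafter _ hlen (by omega)
    · intro a ha b hb
      obtain ⟨i, hi, rfl⟩ := List.mem_iff_getElem.mp ha
      have hi2 : i < r ∧ i < pool.length := by
        rw [List.length_take] at hi; omega
      have hxa : x < pool[i]'hi2.2 := hbefore i hi2.2 hi2.1
      have hgt : (List.take r pool)[i]'hi = pool[i]'hi2.2 := List.getElem_take
      rcases List.mem_cons.mp hb with rfl | hb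
      · rw [hgt]; exact le_of_lt hxa
      · obtain ⟨j, hj, rfl⟩ := List.mem_iff_getElem.mp hb
        have hjlen : r + j < pool.length := by
          rw [List.length_drop] at hj; omega
        rw [hgt, List.getElem_drop]
        exact le_trans (hafter _ hjlen (by omega)) (le_of_lt hxa)
  · have h := List.perm_middle (a := x) (l₁ := List.take r pool) (l₂ := List.drop r pool)
    rw [List.take_append_drop] at h
    exact h

-- the re-insertion loop keeps the pool descending; contents grow by the inserted elements
theorem foldl_pvInsert_facts (ys : List Int) :
    ∀ (pool : List Int), pool.Pairwise (· ≥ ·) →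
    (ys.foldl pvInsert pool).Pairwise (· ≥ ·) ∧ (ys.foldl pvInsert pool).Perm (ys ++ pool) := by
  induction ys with
  | nil => intro pool hp; exact ⟨hp, by simp⟩
  | cons y ys ih =>
      intro pool hp
      obtain ⟨h1, h2⟩ := pvInsert_facts pool y hp
      obtain ⟨h3, h4⟩ := ih (pvInsert pool y) h1
      refine ⟨h3, ?_⟩
      have hstep : (ys ++ pvInsert pool y).Perm (y :: (ys ++ pool)) :=
        (h2.append_left ys).trans List.perm_middle
      exact h4.trans hstep

-- the selection loop pops exactly the n smallest elements (in ascending order) of ps ∪ pool,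
-- leaving prefixes of ps and pool whose merge is the rest
theorem pvSelect_spec (n : Nat) :
    ∀ (ps pool acc : List Int), ps.Pairwise (· ≥ ·) → pool.Pairwise (· ≥ ·) →
    n ≤ ps.length + pool.length →
    ∃ ps' pool', ps'.Sublist ps ∧ pool'.Sublist pool ∧
      pvSelect n ps pool acc = (ps', pool', acc ++ (pvM ps.reverse pool.reverse).take n) ∧
      pvM ps'.reverse pool'.reverse = (pvM ps.reverse pool.reverse).drop n := by
  induction n with
  | zero =>
      intro ps pool acc _ _ _
      exact ⟨ps, pool, List.Sublist.refl _, List.Sublist.refl _, by simp [pvSelect], by simp⟩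
  | succ n ih =>
      intro ps pool acc hps hpool hn
      by_cases hc : (!ps.isEmpty && (pool.isEmpty || decide (ps.getLastD 0 ≤ pool.getLastD 0))) = true
      · -- take from ps
        have hne : ps ≠ [] := by
          intro h; subst h; simp at hc
        obtain ⟨q, v, rfl⟩ := (List.eq_nil_or_concat' ps).resolve_left hne
        have hlast : (q ++ [v]).getLastD 0 = v := by simp
        have hdrop : (q ++ [v]).dropLast = q := by simp
        have hrev : (q ++ [v]).reverse = v :: q.reverse := by simp
        have hhead : pvM (q ++ [v]).reverse pool.reverse = v :: pvM q.reverse pool.reverse := by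
          rw [hrev]
          rcases List.eq_nil_or_concat' pool with rfl | ⟨r, w, rfl⟩
          · rw [List.reverse_nil, pvM_nil_right, pvM_nil_right]
          · have hvw : v ≤ w := by
              rw [Bool.and_eq_true] at hc
              have hc2 := hc.2
              simpa using hc2
            have : (r ++ [w]).reverse = w :: r.reverse := by simp
            rw [this, pvM, if_pos hvw]
        obtain ⟨ps', pool', hs1, hs2, heq, hm⟩ := ih q pool (acc ++ [v])
          (hps.sublist (List.sublist_append_left q [v])) hpool
          (by simp at hn ⊢; omega)
        refine ⟨ps', pool', hs1.trans (List.sublist_append_left q [v]), hs2, ?_, ?_⟩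
        · rw [pvSelect, if_pos hc, hdrop, hlast, heq, hhead]
          simp
        · rw [hm, hhead]
          rfl
      · -- take from pool
        have hpoolne : pool ≠ [] := by
          intro h; subst h
          simp only [List.isEmpty_nil] at hc
          have hpsne : ps ≠ [] := by
            intro h; subst h; simp at hn
          simp [hpsne] at hc
        obtain ⟨r, w, rfl⟩ := (List.eq_nil_or_concat' pool).resolve_left hpoolne
        have hlast : (r ++ [w]).getLastD 0 = w := by simp
        have hdrop : (r ++ [w]).dropLast = r := by simp
        have hrevp : (r ++ [w]).reverse = w :: r.reverse := by simp
        have hhead : pvM ps.reverse (r ++ [w]).reverse = w :: pvM ps.reverse r.reverse := by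
          rw [hrevp]
          rcases List.eq_nil_or_concat' ps with rfl | ⟨q, v, rfl⟩
          · simp [pvM]
          · have hwv : ¬ v ≤ w := by
              intro hle
              apply hc
              simp [hle]
            have hq : (q ++ [v]).reverse = v :: q.reverse := by simp
            rw [hq, pvM, if_neg hwv]
        obtain ⟨ps', pool', hs1, hs2, heq, hm⟩ := ih ps r (acc ++ [w]) hps
          (hpool.sublist (List.sublist_append_left r [w]))
          (by simp at hn ⊢; omega)
        refine ⟨ps', pool', hs1, hs2.trans (List.sublist_append_left r [w]), ?_, ?_⟩
        · rw [pvSelect, if_neg hc, hdrop, hlast, heq, hhead]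
          simp
        · rw [hm, hhead]
          rfl

-- one step: B's loop body produces A's map entry, and its pool stays a descending
-- permutation of A's free list
theorem pvStep_facts (acc : List (Int × List Int)) (eA pool : List Int) (idp : Int × List Int)
    (h1 : pool.reverse.Perm eA) (h2 : pool.Pairwise (· ≥ ·)) :
    (pvStepB (acc, pool) idp).1 = (pvStepA (acc, eA) idp).1 ∧
    ((pvStepB (acc, pool) idp).2).reverse.Perm ((pvStepA (acc, eA) idp).2) ∧
    ((pvStepB (acc, pool) idp).2).Pairwise (· ≥ ·) := by
  have hpsd : (PySem.List.sorted idp.2 (fun x => x) true).Pairwise (· ≥ ·) :=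
    (PySem.List.sorted_pairwise_rev idp.2 (fun x => x)).imp (fun h => h)
  have hpsperm : (PySem.List.sorted idp.2 (fun x => x) true).Perm idp.2 :=
    PySem.List.sorted_perm _ _ _
  have hlen : (PySem.List.sorted idp.2 (fun x => x) true).length = idp.2.length :=
    PySem.List.length_sorted _ _ _
  set ps := PySem.List.sorted idp.2 (fun x => x) true with hps
  obtain ⟨ps', pool', hs1, hs2, heq, hm⟩ :=
    pvSelect_spec ps.length ps pool [] hpsd h2 (Nat.le_add_right _ _)
  rw [List.nil_append] at heq
  have hMperm : (pvM ps.reverse pool.reverse).Perm (idp.2 ++ eA) :=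
    (pvM_perm _ _).trans (((ps.reverse_perm).trans hpsperm).append h1)
  have hMpw : (pvM ps.reverse pool.reverse).Pairwise (· ≤ ·) :=
    pvM_pairwise _ _ (List.pairwise_reverse.mpr (hpsd.imp (fun h => h)))
      (List.pairwise_reverse.mpr (h2.imp (fun h => h)))
  have hMs : PySem.List.sorted (idp.2 ++ eA) (fun x => x) false = pvM ps.reverse pool.reverse :=
    PySem.List.sorted_id_eq_of_perm_of_pairwise _ _ hMperm hMpw
  obtain ⟨hfpw, hfperm⟩ := foldl_pvInsert_facts ps' pool' (h2.sublist hs2)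
  have hBstep : pvStepB (acc, pool) idp =
      (acc ++ [(idp.1, (pvM ps.reverse pool.reverse).take ps.length)], ps'.foldl pvInsert pool') := by
    simp only [pvStepB, ← hps, heq]
  refine ⟨?_, ?_, ?_⟩
  · rw [hBstep]
    simp only [pvStepA, hMs, ← hlen]
  · rw [hBstep]
    simp only [pvStepA, hMs, ← hlen]
    rw [← hm]
    exact (List.reverse_perm _).trans (hfperm.trans
      ((((ps'.reverse_perm).symm).append ((pool'.reverse_perm).symm)).trans (pvM_perm _ _).symm))
  · rw [hBstep]
    exact hfpw

-- loop invariant: B's descending pool stays a permutation of A's free list, so the folds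
-- produce the same map
theorem pvLoop_eq (l : List (Int × List Int)) :
    ∀ (acc : List (Int × List Int)) (eA pool : List Int),
    pool.reverse.Perm eA → pool.Pairwise (· ≥ ·) →
    (l.foldl pvStepA (acc, eA)).1 = (l.foldl pvStepB (acc, pool)).1 := by
  induction l with
  | nil => intro acc eA pool _ _; rfl
  | cons idp t ih =>
      intro acc eA pool hperm hpw
      obtain ⟨hfst, hsndperm, hsndpw⟩ := pvStep_facts acc eA pool idp hperm hpw
      simp only [List.foldl_cons]
      have hA : pvStepA (acc, eA) idp = ((pvStepA (acc, eA) idp).1, (pvStepA (acc, eA) idp).2) := rfl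
      have hB : pvStepB (acc, pool) idp = ((pvStepB (acc, pool) idp).1, (pvStepB (acc, pool) idp).2) := rfl
      rw [hA, hB, hfst]
      exact ih _ _ _ hsndperm hsndpw

-- ===== VERDICT (by name: the statement is the Claim_ definition above) =====
theorem part1_spec : Claim_equal_part1 := by
  intro map empty_pos _
  unfold Spec_part1 part1 part1_alt
  exact pvLoop_eq map.reverse [] empty_pos (PySem.List.sorted empty_pos (fun x => x) true)
    (((PySem.List.sorted empty_pos (fun x => x) true).reverse_perm).trans
      (PySem.List.sorted_perm _ _ _))
    ((PySem.List.sorted_pairwise_rev empty_pos (fun x => x)).imp (fun h => h))
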